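-- pv_equiv track=rewrite | github.com/kgirtz/AdventOfCode | AoC2021/Day 10/Day 10.py | completion_score
-- ===== SOURCE A (Python) =====
-- def completion_score(end: str) -> int:
--     scores: dict[str, int] = {')': 1,
--                               ']': 2,
--                               '}': 3,
--                               '>': 4}
--     score: int = 0
--     for ch in end:
--         score = 5 * score + scores[ch]
--     return score
-- ===== SOURCE B (Python) =====
-- def completion_score(end: str) -> int:
--     scores: dict[str, int] = {')': 1,
--                               ']': 2,
--                               '}': 3,
--                               '>': 4}
--     score: int = 0
--     mult: int = 1
--     for ch in reversed(end):
--         score += scores[ch] * mult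
--         mult *= 5
--     return score
-- ===== Notes on version B (the rewrite author's own statement) =====
-- stated objective: alternative
-- what changed: B traverses the string in reverse with an explicit place-value multiplier (score += scores[ch]*mult; mult *= 5) instead of A's forward Horner accumulation (score = 5*score + scores[ch]).
import Mathlib
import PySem

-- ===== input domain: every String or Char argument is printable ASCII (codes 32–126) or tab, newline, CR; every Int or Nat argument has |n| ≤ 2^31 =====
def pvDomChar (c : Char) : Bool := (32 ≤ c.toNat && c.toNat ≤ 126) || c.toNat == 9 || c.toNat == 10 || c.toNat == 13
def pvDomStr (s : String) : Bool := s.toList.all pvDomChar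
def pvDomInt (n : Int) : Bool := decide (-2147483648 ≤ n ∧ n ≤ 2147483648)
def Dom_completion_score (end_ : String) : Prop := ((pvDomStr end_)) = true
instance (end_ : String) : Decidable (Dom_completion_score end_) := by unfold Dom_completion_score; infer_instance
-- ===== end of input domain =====

-- B iterates over the characters in reverse with an explicit place-value multiplier
-- instead of A's forward Horner accumulation; same O(n) cost (objective: alternative).


-- ===== PORT A =====
-- scores[ch]: exact on Pre_ (every character is one of ')' ']' '}' '>'); Python raises
-- KeyError on any other character, which Pre_ excludes.
def pvScoreOf (c : Char) : Int :=
  if c = ')' then 1 else if c = ']' then 2 else if c = '}' then 3 else if c = '>' then 4 else 0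

def completion_score (end_ : String) : Int :=
  end_.toList.foldl (fun score ch => 5 * score + pvScoreOf ch) 0

-- ===== PORT B =====
def completion_score_alt (end_ : String) : Int :=
  (end_.toList.reverse.foldl
    (fun (sm : Int × Int) ch => (sm.1 + pvScoreOf ch * sm.2, sm.2 * 5)) (0, 1)).1

-- ===== PRECONDITION & SPEC =====
-- Pre_ excludes exactly the strings containing a character other than ')' ']' '}' '>',
-- on which Python A raises KeyError.
def Pre_completion_score (end_ : String) : Prop :=
  (end_.toList.all (fun c => c == ')' || c == ']' || c == '}' || c == '>')) = true
instance (end_ : String) : Decidable (Pre_completion_score end_) := by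
  unfold Pre_completion_score; infer_instance
def pvWitness_completion_score : String := ")]}>"

def Spec_completion_score (end_ : String) (out : Int) : Prop := out = completion_score_alt end_
instance (end_ : String) (out : Int) : Decidable (Spec_completion_score end_ out) := by unfold Spec_completion_score; infer_instance

-- ===== CLAIM (what is proved, stated in full; the proofs are below) =====
def Claim_equal_completion_score : Prop := ∀ (end_ : String), Dom_completion_score end_ → Pre_completion_score end_ → Spec_completion_score end_ (completion_score end_)

-- ===== LEMMAS AND PROOFS =====
theorem pv_key (l : List Char) (s m : Int) :
    (l.foldl (fun (sm : Int × Int) ch => (sm.1 + pvScoreOf ch * sm.2, sm.2 * 5)) (s, m)).1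
      = s + m * (l.reverse.foldl (fun score ch => 5 * score + pvScoreOf ch) 0) := by
  induction l generalizing s m with
  | nil => simp
  | cons c l ih =>
      simp only [List.foldl_cons, List.reverse_cons, List.foldl_append, List.foldl_cons,
        List.foldl_nil, ih]
      ring

-- ===== VERDICT (by name: the statement is the Claim_ definition above) =====
theorem completion_score_spec : Claim_equal_completion_score := by
  intro end_ _ _
  unfold Spec_completion_score completion_score completion_score_alt
  rw [pv_key]
  simp
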